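-- pv_equiv track=rewrite | github.com/0-FoxHunt-0/Word-Finder | database/optimized_word_database.py | _dict_matches_to_flags
-- ===== SOURCE A (Python) =====
-- from typing import List, Dict, Any, Optional
--
-- def _dict_matches_to_flags(dict_matches: Dict[str, bool]) -> int:
--     """Convert dictionary matches to bit flags (6 bits vs 150+ characters)."""
--     flags = 0
--     flag_mapping = {'octordle': 0, 'otcwl': 1,
--                     'quordle': 2, 'sowpods': 3, 'wordle': 4, 'wwf': 5}
--
--     for dict_name, is_match in dict_matches.items():
--         if is_match and dict_name in flag_mapping:
--             flags |= (1 << flag_mapping[dict_name])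
--     return flags
-- ===== SOURCE B (Python) =====
-- def _dict_matches_to_flags(dict_matches):
--     """Convert dictionary matches to bit flags (6 bits vs 150+ characters)."""
--     flags = 0
--     for bit, name in enumerate(('octordle', 'otcwl', 'quordle', 'sowpods', 'wordle', 'wwf')):
--         if dict_matches.get(name):
--             flags |= 1 << bit
--     return flags
-- ===== Notes on version B (the rewrite author's own statement) =====
-- stated objective: alternative
-- what changed: B loops over the fixed 6-entry flag mapping doing one dict.get per flag name, instead of looping over the arbitrary input dict and testing each key for membership in the mapping.
import Mathlib
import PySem

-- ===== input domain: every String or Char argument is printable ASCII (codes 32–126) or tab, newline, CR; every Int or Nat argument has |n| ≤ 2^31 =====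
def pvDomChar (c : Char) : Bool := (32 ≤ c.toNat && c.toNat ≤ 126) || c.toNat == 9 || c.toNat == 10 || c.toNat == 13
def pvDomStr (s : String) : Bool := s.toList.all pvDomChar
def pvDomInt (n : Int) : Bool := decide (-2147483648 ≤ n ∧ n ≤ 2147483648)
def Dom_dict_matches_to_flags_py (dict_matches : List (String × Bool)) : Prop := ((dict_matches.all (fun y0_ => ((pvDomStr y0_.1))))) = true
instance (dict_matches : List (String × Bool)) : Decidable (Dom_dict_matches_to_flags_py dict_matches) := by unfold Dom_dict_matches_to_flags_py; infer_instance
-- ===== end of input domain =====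

-- B iterates the fixed 6-entry flag mapping with one dict lookup per flag name instead of
-- iterating the input dict and testing each key for membership in the mapping (alternative decomposition).

-- ===== PORT A =====
-- literal transliteration of A: loop over dict_matches.items(), guard `is_match and name in flag_mapping`
def dict_matches_to_flags_py (dict_matches : List (String × Bool)) : Int :=
  let flag_mapping : List (String × Nat) :=
    [("octordle", 0), ("otcwl", 1), ("quordle", 2), ("sowpods", 3), ("wordle", 4), ("wwf", 5)]
  dict_matches.foldl
    (fun flags p =>
      if p.2 && (List.lookup p.1 flag_mapping).isSome then
        PySem.Int.bor flags ((1 : Int) <<< ((List.lookup p.1 flag_mapping).getD 0))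
      else flags)
    0

-- ===== PORT B =====
-- literal transliteration of B: loop over enumerate(names); dict.get(name) = first-match lookup
-- (the enumerate index is ≥ 0, so `.toNat` on it is exact)
def dict_matches_to_flags_py_alt (dict_matches : List (String × Bool)) : Int :=
  (PySem.List.enumerate ["octordle", "otcwl", "quordle", "sowpods", "wordle", "wwf"]).foldl
    (fun flags p =>
      if (List.lookup p.2 dict_matches).getD false then
        PySem.Int.bor flags ((1 : Int) <<< p.1.toNat)
      else flags)
    0

-- ===== PRECONDITION & SPEC =====
-- Pre_ excludes association lists with duplicate keys: a Python dict can never hold a duplicate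
-- key, so such lists do not encode any input of the Python programs (this is an encoding
-- restriction, not a restriction of A's Python domain).
def Pre_dict_matches_to_flags_py (dict_matches : List (String × Bool)) : Prop :=
  (dict_matches.map Prod.fst).Nodup
instance (dict_matches : List (String × Bool)) : Decidable (Pre_dict_matches_to_flags_py dict_matches) := by
  unfold Pre_dict_matches_to_flags_py; infer_instance

def pvWitness_dict_matches_to_flags_py : (List (String × Bool)) :=
  [("wordle", true), ("wwf", false), ("abc", true)]

def Spec_dict_matches_to_flags_py (dict_matches : List (String × Bool)) (out : Int) : Prop := out = dict_matches_to_flags_py_alt dict_matches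
instance (dict_matches : List (String × Bool)) (out : Int) : Decidable (Spec_dict_matches_to_flags_py dict_matches out) := by unfold Spec_dict_matches_to_flags_py; infer_instance

-- ===== CLAIM (what is proved, stated in full; the proofs are below) =====
def Claim_equal_dict_matches_to_flags_py : Prop := ∀ (dict_matches : List (String × Bool)), Dom_dict_matches_to_flags_py dict_matches → Pre_dict_matches_to_flags_py dict_matches → Spec_dict_matches_to_flags_py dict_matches (dict_matches_to_flags_py dict_matches)

-- ===== LEMMAS AND PROOFS =====

-- the flag word as a function of the six match booleans
def pvNatOf (b0 b1 b2 b3 b4 b5 : Bool) : Nat :=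
  (if b0 then 1 else 0) + (if b1 then 2 else 0) + (if b2 then 4 else 0) +
  (if b3 then 8 else 0) + (if b4 then 16 else 0) + (if b5 then 32 else 0)

-- "some entry for name n is True" (what A's loop accumulates)
def pvHasT (dm : List (String × Bool)) (n : String) : Bool :=
  dm.any (fun p => p.1 == n && p.2)

-- A's loop body, named for the proofs (definitionally the lambda in the port)
def pvStepA (flags : Int) (p : String × Bool) : Int :=
  if p.2 && (List.lookup p.1
      [("octordle", (0:Nat)), ("otcwl", 1), ("quordle", 2), ("sowpods", 3), ("wordle", 4), ("wwf", 5)]).isSome then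
    PySem.Int.bor flags ((1 : Int) <<< ((List.lookup p.1
      [("octordle", (0:Nat)), ("otcwl", 1), ("quordle", 2), ("sowpods", 3), ("wordle", 4), ("wwf", 5)]).getD 0))
  else flags

lemma pv_A_unfold (dm : List (String × Bool)) :
    dict_matches_to_flags_py dm = dm.foldl pvStepA 0 := rfl

lemma pv_hasT_cons (k : String) (v : Bool) (tl : List (String × Bool)) (n : String) :
    pvHasT ((k, v) :: tl) n = ((k == n && v) || pvHasT tl n) := by
  simp [pvHasT]

lemma pv_hasT_false_of_not_mem (dm : List (String × Bool)) (n : String)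
    (h : n ∉ dm.map Prod.fst) : pvHasT dm n = false := by
  simp only [pvHasT, List.any_eq_false]
  intro p hp
  simp only [Bool.and_eq_true, beq_iff_eq]
  rintro ⟨rfl, -⟩
  exact h (List.mem_map.mpr ⟨p, hp, rfl⟩)

lemma pv_setbit0 : ∀ b0 b1 b2 b3 b4 b5 : Bool,
    PySem.Int.bor ((pvNatOf b0 b1 b2 b3 b4 b5 : Nat) : Int) 1
      = ((pvNatOf true b1 b2 b3 b4 b5 : Nat) : Int) := by decide

lemma pv_setbit1 : ∀ b0 b1 b2 b3 b4 b5 : Bool,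
    PySem.Int.bor ((pvNatOf b0 b1 b2 b3 b4 b5 : Nat) : Int) ((1 : Int) <<< (1 : Nat))
      = ((pvNatOf b0 true b2 b3 b4 b5 : Nat) : Int) := by decide

lemma pv_setbit2 : ∀ b0 b1 b2 b3 b4 b5 : Bool,
    PySem.Int.bor ((pvNatOf b0 b1 b2 b3 b4 b5 : Nat) : Int) ((1 : Int) <<< (2 : Nat))
      = ((pvNatOf b0 b1 true b3 b4 b5 : Nat) : Int) := by decide

lemma pv_setbit3 : ∀ b0 b1 b2 b3 b4 b5 : Bool,
    PySem.Int.bor ((pvNatOf b0 b1 b2 b3 b4 b5 : Nat) : Int) ((1 : Int) <<< (3 : Nat))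
      = ((pvNatOf b0 b1 b2 true b4 b5 : Nat) : Int) := by decide

lemma pv_setbit4 : ∀ b0 b1 b2 b3 b4 b5 : Bool,
    PySem.Int.bor ((pvNatOf b0 b1 b2 b3 b4 b5 : Nat) : Int) ((1 : Int) <<< (4 : Nat))
      = ((pvNatOf b0 b1 b2 b3 true b5 : Nat) : Int) := by decide

lemma pv_setbit5 : ∀ b0 b1 b2 b3 b4 b5 : Bool,
    PySem.Int.bor ((pvNatOf b0 b1 b2 b3 b4 b5 : Nat) : Int) ((1 : Int) <<< (5 : Nat))
      = ((pvNatOf b0 b1 b2 b3 b4 true : Nat) : Int) := by decide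

lemma pv_stepA_false (f : Int) (k : String) : pvStepA f (k, false) = f := by
  simp [pvStepA]

lemma pv_stepA_other (f : Int) (k : String)
    (h0 : k ≠ "octordle") (h1 : k ≠ "otcwl") (h2 : k ≠ "quordle")
    (h3 : k ≠ "sowpods") (h4 : k ≠ "wordle") (h5 : k ≠ "wwf") :
    pvStepA f (k, true) = f := by
  have b0 : (k == "octordle") = false := beq_eq_false_iff_ne.mpr h0
  have b1 : (k == "otcwl") = false := beq_eq_false_iff_ne.mpr h1
  have b2 : (k == "quordle") = false := beq_eq_false_iff_ne.mpr h2
  have b3 : (k == "sowpods") = false := beq_eq_false_iff_ne.mpr h3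
  have b4 : (k == "wordle") = false := beq_eq_false_iff_ne.mpr h4
  have b5 : (k == "wwf") = false := beq_eq_false_iff_ne.mpr h5
  simp [pvStepA, List.lookup, b0, b1, b2, b3, b4, b5]

lemma pv_stepA_n0 (b0 b1 b2 b3 b4 b5 : Bool) :
    pvStepA ((pvNatOf b0 b1 b2 b3 b4 b5 : Nat) : Int) ("octordle", true)
      = ((pvNatOf true b1 b2 b3 b4 b5 : Nat) : Int) := by
  simp [pvStepA, List.lookup, pv_setbit0]

lemma pv_stepA_n1 (b0 b1 b2 b3 b4 b5 : Bool) :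
    pvStepA ((pvNatOf b0 b1 b2 b3 b4 b5 : Nat) : Int) ("otcwl", true)
      = ((pvNatOf b0 true b2 b3 b4 b5 : Nat) : Int) := by
  simp [pvStepA, List.lookup, pv_setbit1]

lemma pv_stepA_n2 (b0 b1 b2 b3 b4 b5 : Bool) :
    pvStepA ((pvNatOf b0 b1 b2 b3 b4 b5 : Nat) : Int) ("quordle", true)
      = ((pvNatOf b0 b1 true b3 b4 b5 : Nat) : Int) := by
  simp [pvStepA, List.lookup, pv_setbit2]

lemma pv_stepA_n3 (b0 b1 b2 b3 b4 b5 : Bool) :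
    pvStepA ((pvNatOf b0 b1 b2 b3 b4 b5 : Nat) : Int) ("sowpods", true)
      = ((pvNatOf b0 b1 b2 true b4 b5 : Nat) : Int) := by
  simp [pvStepA, List.lookup, pv_setbit3]

lemma pv_stepA_n4 (b0 b1 b2 b3 b4 b5 : Bool) :
    pvStepA ((pvNatOf b0 b1 b2 b3 b4 b5 : Nat) : Int) ("wordle", true)
      = ((pvNatOf b0 b1 b2 b3 true b5 : Nat) : Int) := by
  simp [pvStepA, List.lookup, pv_setbit4]

lemma pv_stepA_n5 (b0 b1 b2 b3 b4 b5 : Bool) :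
    pvStepA ((pvNatOf b0 b1 b2 b3 b4 b5 : Nat) : Int) ("wwf", true)
      = ((pvNatOf b0 b1 b2 b3 b4 true : Nat) : Int) := by
  simp [pvStepA, List.lookup, pv_setbit5]

lemma pv_A_aux : ∀ (dm : List (String × Bool)) (b0 b1 b2 b3 b4 b5 : Bool),
    dm.foldl pvStepA ((pvNatOf b0 b1 b2 b3 b4 b5 : Nat) : Int)
      = ((pvNatOf (b0 || pvHasT dm "octordle") (b1 || pvHasT dm "otcwl") (b2 || pvHasT dm "quordle")
           (b3 || pvHasT dm "sowpods") (b4 || pvHasT dm "wordle") (b5 || pvHasT dm "wwf") : Nat) : Int) := by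
  intro dm
  induction dm with
  | nil => intro b0 b1 b2 b3 b4 b5; simp [pvHasT]
  | cons hd tl ih =>
    intro b0 b1 b2 b3 b4 b5
    obtain ⟨k, v⟩ := hd
    rw [List.foldl_cons]
    cases v with
    | false =>
      rw [pv_stepA_false, ih]
      simp [pv_hasT_cons]
    | true =>
      by_cases e0 : k = "octordle"
      · subst e0; rw [pv_stepA_n0, ih]; simp [pv_hasT_cons]
      · by_cases e1 : k = "otcwl"
        · subst e1; rw [pv_stepA_n1, ih]; simp [pv_hasT_cons]
        · by_cases e2 : k = "quordle"
          · subst e2; rw [pv_stepA_n2, ih]; simp [pv_hasT_cons]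
          · by_cases e3 : k = "sowpods"
            · subst e3; rw [pv_stepA_n3, ih]; simp [pv_hasT_cons]
            · by_cases e4 : k = "wordle"
              · subst e4; rw [pv_stepA_n4, ih]; simp [pv_hasT_cons]
              · by_cases e5 : k = "wwf"
                · subst e5; rw [pv_stepA_n5, ih]; simp [pv_hasT_cons]
                · rw [pv_stepA_other _ _ e0 e1 e2 e3 e4 e5, ih]
                  have b0 : (k == "octordle") = false := beq_eq_false_iff_ne.mpr e0
                  have b1 : (k == "otcwl") = false := beq_eq_false_iff_ne.mpr e1
                  have b2 : (k == "quordle") = false := beq_eq_false_iff_ne.mpr e2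
                  have b3 : (k == "sowpods") = false := beq_eq_false_iff_ne.mpr e3
                  have b4 : (k == "wordle") = false := beq_eq_false_iff_ne.mpr e4
                  have b5 : (k == "wwf") = false := beq_eq_false_iff_ne.mpr e5
                  simp [pv_hasT_cons, b0, b1, b2, b3, b4, b5]

lemma pv_A_eq (dm : List (String × Bool)) :
    dict_matches_to_flags_py dm
      = ((pvNatOf (pvHasT dm "octordle") (pvHasT dm "otcwl") (pvHasT dm "quordle")
           (pvHasT dm "sowpods") (pvHasT dm "wordle") (pvHasT dm "wwf") : Nat) : Int) := by
  have h := pv_A_aux dm false false false false false false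
  simpa [pv_A_unfold] using h

lemma pv_B_eq (dm : List (String × Bool)) :
    dict_matches_to_flags_py_alt dm
      = ((pvNatOf ((List.lookup "octordle" dm).getD false) ((List.lookup "otcwl" dm).getD false)
           ((List.lookup "quordle" dm).getD false) ((List.lookup "sowpods" dm).getD false)
           ((List.lookup "wordle" dm).getD false) ((List.lookup "wwf" dm).getD false) : Nat) : Int) := by
  unfold dict_matches_to_flags_py_alt
  rw [show PySem.List.enumerate ["octordle", "otcwl", "quordle", "sowpods", "wordle", "wwf"]
        = [((0:Int),"octordle"), (1,"otcwl"), (2,"quordle"), (3,"sowpods"), (4,"wordle"), (5,"wwf")] from rfl]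
  simp only [List.foldl_cons, List.foldl_nil]
  generalize (List.lookup "octordle" dm).getD false = c0
  generalize (List.lookup "otcwl" dm).getD false = c1
  generalize (List.lookup "quordle" dm).getD false = c2
  generalize (List.lookup "sowpods" dm).getD false = c3
  generalize (List.lookup "wordle" dm).getD false = c4
  generalize (List.lookup "wwf" dm).getD false = c5
  revert c0 c1 c2 c3 c4 c5
  decide

lemma pv_look_eq_hasT (dm : List (String × Bool)) (h : (dm.map Prod.fst).Nodup) (n : String) :
    (List.lookup n dm).getD false = pvHasT dm n := by
  induction dm with
  | nil => simp [pvHasT]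
  | cons hd tl ih =>
    obtain ⟨k, v⟩ := hd
    rw [List.map_cons, List.nodup_cons] at h
    by_cases e : k = n
    · subst e
      rw [pv_hasT_cons, pv_hasT_false_of_not_mem tl k h.1]
      simp [List.lookup]
    · rw [pv_hasT_cons]
      have hne : (n == k) = false := by simp [Ne.symm e]
      simp only [List.lookup, hne]
      have hke : (k == n) = false := by simp [e]
      rw [hke, ih h.2]
      simp

-- ===== VERDICT (by name: the statement is the Claim_ definition above) =====
theorem dict_matches_to_flags_py_spec : Claim_equal_dict_matches_to_flags_py := by
  intro dm _ hpre
  unfold Spec_dict_matches_to_flags_py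
  rw [pv_A_eq, pv_B_eq,
    pv_look_eq_hasT dm hpre, pv_look_eq_hasT dm hpre, pv_look_eq_hasT dm hpre,
    pv_look_eq_hasT dm hpre, pv_look_eq_hasT dm hpre, pv_look_eq_hasT dm hpre]
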